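-- pv_equiv track=rewrite | github.com/mgagliardo/universidadviu | 02 - Segundo/13GIIN - Teoria de Automatas y Lenguajes Formales/03-11/automata.py | disparable
-- ===== SOURCE A (Python) =====
-- def disparable(s,transiciones):
--     val = -1
--     i=0
--     for trans in transiciones:
--         if(s == trans[1]):
--             val = i
--         i=i+1
--     return val
-- ===== SOURCE B (Python) =====
-- def disparable(s, transiciones):
--     for i in range(len(transiciones) - 1, -1, -1):
--         if transiciones[i][1] == s:
--             return i
--     return -1
-- ===== Notes on version B (the rewrite author's own statement) =====
-- stated objective: alternative
-- what changed: Scans the transitions backwards by index and returns the first (i.e. last-in-original-order) match immediately, instead of a forward pass that keeps overwriting an accumulator.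
import Mathlib
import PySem

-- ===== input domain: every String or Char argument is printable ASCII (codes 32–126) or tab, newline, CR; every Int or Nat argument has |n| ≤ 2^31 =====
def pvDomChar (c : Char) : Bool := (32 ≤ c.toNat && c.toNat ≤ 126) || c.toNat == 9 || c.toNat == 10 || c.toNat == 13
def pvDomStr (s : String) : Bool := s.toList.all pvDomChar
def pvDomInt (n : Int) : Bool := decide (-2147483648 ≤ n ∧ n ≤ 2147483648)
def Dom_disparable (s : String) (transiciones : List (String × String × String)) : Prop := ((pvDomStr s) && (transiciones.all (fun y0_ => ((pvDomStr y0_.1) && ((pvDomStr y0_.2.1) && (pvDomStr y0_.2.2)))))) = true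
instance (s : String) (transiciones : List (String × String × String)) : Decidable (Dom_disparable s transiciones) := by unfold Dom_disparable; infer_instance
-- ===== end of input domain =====

-- B scans the indices backwards and returns on the first match (same result: the
-- last matching index), instead of A's forward pass overwriting an accumulator.

-- ===== PORT A =====
-- forward loop: state (val, i); on a match val := i; i increases each step
def disparable (s : String) (transiciones : List (String × String × String)) : Int :=
  (transiciones.foldl
    (fun (st : Int × Int) trans => (if s = trans.2.1 then st.2 else st.1, st.2 + 1))
    (-1, 0)).1

-- ===== PORT B =====
-- walk the index list [n-1, n-2, …, 0]; first hit is returned immediately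
def disparableAltGo (s : String) (ts : List (String × String × String)) : List Int → Int
  | [] => -1
  | i :: rest =>
    if (PySem.List.pyGetD ts i ("", "", "")).2.1 = s then i
    else disparableAltGo s ts rest

def disparable_alt (s : String) (transiciones : List (String × String × String)) : Int :=
  disparableAltGo s transiciones
    (PySem.List.pyRange ((transiciones.length : Int) - 1) (-1) (-1))

-- ===== PRECONDITION & SPEC =====
def Spec_disparable (s : String) (transiciones : List (String × String × String)) (out : Int) : Prop := out = disparable_alt s transiciones
instance (s : String) (transiciones : List (String × String × String)) (out : Int) : Decidable (Spec_disparable s transiciones out) := by unfold Spec_disparable; infer_instance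

-- ===== CLAIM (what is proved, stated in full; the proofs are below) =====
def Claim_equal_disparable : Prop := ∀ (s : String) (transiciones : List (String × String × String)), Dom_disparable s transiciones → Spec_disparable s transiciones (disparable s transiciones)

-- ===== LEMMAS AND PROOFS =====

theorem disparable_fold_snd (s : String) (ts : List (String × String × String))
    (st : Int × Int) :
    (ts.foldl (fun (st : Int × Int) trans =>
        (if s = trans.2.1 then st.2 else st.1, st.2 + 1)) st).2 = st.2 + ts.length := by
  induction ts generalizing st with
  | nil => simp
  | cons t ts ih => simp [List.foldl_cons, ih]; ring

theorem disparableAltGo_append (s : String) (ts : List (String × String × String))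
    (t : String × String × String) (is : List Int)
    (h : ∀ i ∈ is, 0 ≤ i ∧ i < (ts.length : Int)) :
    disparableAltGo s (ts ++ [t]) is = disparableAltGo s ts is := by
  induction is with
  | nil => rfl
  | cons i rest ih =>
    obtain ⟨h0, h1⟩ := h i (List.mem_cons_self ..)
    have hget : PySem.List.pyGetD (ts ++ [t]) i ("", "", "")
        = PySem.List.pyGetD ts i ("", "", "") := by
      rw [PySem.List.pyGetD_eq_getElem (ts ++ [t]) _ h0 (by simp; omega),
        PySem.List.pyGetD_eq_getElem ts _ h0 h1]
      rw [List.getElem_append_left (by omega)]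
    simp only [disparableAltGo, hget, ih (fun j hj => h j (List.mem_cons_of_mem _ hj))]

theorem disparable_eq_alt (s : String) (ts : List (String × String × String)) :
    disparable s ts = disparable_alt s ts := by
  induction ts using List.reverseRecOn with
  | nil => rfl
  | append_singleton ts t ih =>
    have hB : disparable_alt s (ts ++ [t])
        = if (t.2.1 = s) then (ts.length : Int) else disparable_alt s ts := by
      unfold disparable_alt
      have hlen : ((ts ++ [t]).length : Int) - 1 = (ts.length : Int) := by
        simp
      rw [hlen, PySem.List.pyRange_neg_one_cons (by omega)]
      have hget : PySem.List.pyGetD (ts ++ [t]) (ts.length : Int) ("", "", "") = t := by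
        rw [PySem.List.pyGetD_eq_getElem (ts ++ [t]) _ (by positivity) (by simp)]
        simp
      simp only [disparableAltGo, hget]
      split_ifs with hc
      · rfl
      · exact disparableAltGo_append s ts t _
          (fun i hi => by
            have := (PySem.List.mem_pyRange_neg_one).mp hi
            omega)
    unfold disparable
    rw [List.foldl_append]
    simp only [List.foldl_cons, List.foldl_nil]
    rw [hB]
    by_cases hc : s = t.2.1
    · simp [hc, disparable_fold_snd]
    · have hc' : ¬ (t.2.1 = s) := fun h => hc h.symm
      simp only [if_neg hc, if_neg hc']
      exact ih

-- ===== VERDICT (by name: the statement is the Claim_ definition above) =====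
theorem disparable_spec : Claim_equal_disparable := by
  intro s ts _
  unfold Spec_disparable
  exact disparable_eq_alt s ts
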